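-- pv_equiv track=rewrite | github.com/askmadsen/introduction-to-programming | imperative/lists.py | last_position_max
-- ===== SOURCE A (Python) =====
-- def last_position_max(s: list[int]) -> int:
--     """ Returnd the index of the last occurrence of the max element in s or -1 if s is empty.
--     >>> last_position_max([1,7,3,5,7,3])
--     4
--     >>> last_position_max([])
--     -1
--     """
--     if s == []:
--         return -1
--     else:
--         i = 0
--         max = s[0]
--         pos = 0
--         while i < len(s):
--             if s[i] >= max:
--                 max = s[i]
--                 pos = i
--             i = i + 1
--         return pos
-- ===== SOURCE B (Python) =====
-- def last_position_max(s: list[int]) -> int: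
--     if not s:
--         return -1
--     m = max(s)
--     return len(s) - 1 - s[::-1].index(m)
-- ===== Notes on version B (the rewrite author's own statement) =====
-- stated objective: simpler
-- what changed: Replaces A's single running-max/position while-loop with a compute-max-then-locate decomposition: take max(s) once, then find its last occurrence by first-match search in the reversed list (constant-factor faster in CPython since max/index/slicing run in C).
import Mathlib
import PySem

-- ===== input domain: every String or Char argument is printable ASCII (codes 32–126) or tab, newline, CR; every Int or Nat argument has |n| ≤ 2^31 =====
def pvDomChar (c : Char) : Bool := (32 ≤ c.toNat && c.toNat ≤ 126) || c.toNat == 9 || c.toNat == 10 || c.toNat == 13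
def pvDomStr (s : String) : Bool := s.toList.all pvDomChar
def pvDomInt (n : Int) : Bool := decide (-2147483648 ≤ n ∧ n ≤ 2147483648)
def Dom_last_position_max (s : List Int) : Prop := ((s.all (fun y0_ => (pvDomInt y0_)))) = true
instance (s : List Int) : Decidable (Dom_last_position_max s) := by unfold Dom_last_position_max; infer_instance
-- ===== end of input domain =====

-- B replaces A's single running-max/position loop with a compute-max-then-locate-from-the-right
-- decomposition (objective: simpler).

-- ===== PORT A =====
-- while-loop over i with running (max, pos) state, as a fold over the enumerated list
def last_position_max (s : List Int) : Int :=
  match s with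
  | [] => -1
  | x :: _ =>
    ((PySem.List.enumerate s 0).foldl
      (fun (st : Int × Int) p => if p.2 ≥ st.1 then (p.2, p.1) else st) (x, 0)).2

-- ===== PORT B =====
-- m = max(s); len(s) - 1 - s[::-1].index(m).  `.index` never fails here since m ∈ s,
-- so the none branch (Python would raise ValueError) is unreachable; getD 0 is a placeholder.
def last_position_max_alt (s : List Int) : Int :=
  match PySem.List.max? s (fun y => y) with
  | none => -1
  | some m => (s.length : Int) - 1 - ((PySem.List.index? s.reverse m).getD 0 : Int)

-- ===== PRECONDITION & SPEC =====
def Spec_last_position_max (s : List Int) (out : Int) : Prop := out = last_position_max_alt s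
instance (s : List Int) (out : Int) : Decidable (Spec_last_position_max s out) := by unfold Spec_last_position_max; infer_instance

-- ===== CLAIM (what is proved, stated in full; the proofs are below) =====
def Claim_equal_last_position_max : Prop := ∀ (s : List Int), Dom_last_position_max s → Spec_last_position_max s (last_position_max s)

-- ===== LEMMAS AND PROOFS =====

theorem foldl_max_mem (x : Int) (t : List Int) : t.foldl max x ∈ x :: t := by
  induction t generalizing x with
  | nil => simp
  | cons y t ih =>
    simp only [List.foldl_cons]
    rcases List.mem_cons.mp (ih (max x y)) with h | h
    · rw [h]; rcases max_choice x y with h' | h' <;> simp [h']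
    · simp [h]

theorem main_invariant (x : Int) (t : List Int) :
    (PySem.List.enumerate (x :: t) 0).foldl
      (fun (st : Int × Int) p => if p.2 ≥ st.1 then (p.2, p.1) else st) (x, 0)
    = (t.foldl max x,
       ((x :: t).length : Int) - 1 -
         ((PySem.List.index? (x :: t).reverse (t.foldl max x)).getD 0 : Int)) := by
  induction t using List.reverseRecOn with
  | nil =>
    simp [PySem.List.enumerate, PySem.List.index?]
  | append_singleton t' a ih =>
    have hcons : x :: (t' ++ [a]) = (x :: t') ++ [a] := rfl
    rw [hcons, PySem.List.enumerate_append, List.foldl_append, ih, List.foldl_append]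
    simp only [PySem.List.enumerate_cons, PySem.List.enumerate_nil,
      List.foldl_cons, List.foldl_nil, List.reverse_append, List.reverse_cons,
      List.reverse_nil, List.nil_append, List.singleton_append, List.length_append,
      List.length_cons, List.length_nil]
    by_cases h : a ≥ t'.foldl max x
    · rw [max_eq_right h]
      rw [if_pos h, PySem.List.index?_cons_self]
      simp
    · rw [max_eq_left (le_of_lt (lt_of_not_ge h))]
      rw [if_neg h]
      have hne : a ≠ t'.foldl max x := by
        intro he; exact h (ge_of_eq he)
      rw [PySem.List.index?_cons_of_ne _ hne]
      have hmem : t'.foldl max x ∈ (x :: t').reverse := by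
        rw [List.mem_reverse]; exact foldl_max_mem x t'
      obtain ⟨k, hk⟩ := Option.isSome_iff_exists.mp
        ((PySem.List.index?_isSome_iff _ _).mpr hmem)
      simp only [List.reverse_cons] at hk
      rw [hk]
      simp

theorem last_position_max_spec : Claim_equal_last_position_max := by
  intro s _
  unfold Spec_last_position_max
  cases s with
  | nil => rfl
  | cons x t =>
    simp only [last_position_max, last_position_max_alt, PySem.List.max?_id_cons,
      main_invariant]
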